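-- pv_equiv track=rewrite | github.com/onyxolu/DSA | Tunmise/elimination_game.py | helper
-- ===== SOURCE A (Python) =====
-- def helper(n,sig):
--     if n == 1:
--         return 1
--     if sig:
--         return 2*helper(n//2,False)
--     else:
--         if n%2 == 0:
--             return 2*helper(n//2,True) -1
--         else:
--             return 2*helper(n//2,True)
-- ===== SOURCE B (Python) =====
-- def helper(n, sig):
--     # Iterative unrolling of the recurrence: result = coeff*helper(1) + const.
--     coeff = 1
--     const = 0
--     while n != 1:
--         if (not sig) and n % 2 == 0:
--             const += coeff * -1
--         coeff *= 2
--         n //= 2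
--         sig = not sig
--     return coeff + const
-- ===== Notes on version B (the rewrite author's own statement) =====
-- stated objective: alternative
-- what changed: Replaces the top-down recursion by an iterative loop maintaining an affine accumulator (coeff, const), returning coeff + const; no recursion or call stack.
import Mathlib
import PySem

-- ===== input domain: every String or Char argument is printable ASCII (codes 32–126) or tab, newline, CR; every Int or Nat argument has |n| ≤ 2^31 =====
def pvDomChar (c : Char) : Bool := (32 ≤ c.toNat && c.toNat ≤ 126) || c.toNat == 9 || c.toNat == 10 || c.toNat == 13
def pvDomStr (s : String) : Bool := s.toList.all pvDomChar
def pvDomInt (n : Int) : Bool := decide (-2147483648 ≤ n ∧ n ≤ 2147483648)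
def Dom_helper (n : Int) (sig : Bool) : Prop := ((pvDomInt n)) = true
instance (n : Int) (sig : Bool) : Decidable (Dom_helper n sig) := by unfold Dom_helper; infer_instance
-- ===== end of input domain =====

-- B replaces A's top-down recursion by an iterative loop with an affine accumulator (coeff, const).
-- Both programs only terminate for n ≥ 1 (Pre_); the 'n ≤ 1' guards below only make the ports total.

-- ===== PORT A =====
-- Literal port of A's recursion. The guard 'n ≤ 1' coincides with Python's 'n == 1' on Pre_
-- (n ≥ 1); for n ≤ 0 the Python recursion never terminates (outside Pre_).
def helper (n : Int) (sig : Bool) : Int :=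
  if n ≤ 1 then 1
  else if sig then 2 * helper (PySem.Int.floordiv n 2) false
  else if PySem.Int.mod n 2 = 0 then 2 * helper (PySem.Int.floordiv n 2) true - 1
  else 2 * helper (PySem.Int.floordiv n 2) true
termination_by n.toNat
decreasing_by all_goals
  · simp only [PySem.Int.floordiv]; rw [Int.fdiv_eq_ediv]; omega

-- ===== PORT B =====
-- Literal port of Source B's while loop; 'n ≤ 1' guard = Python's 'n != 1' on Pre_ (totality elsewhere).
def helperAltLoop (n : Int) (sig : Bool) (coeff const : Int) : Int :=
  if n ≤ 1 then coeff + const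
  else
    helperAltLoop (PySem.Int.floordiv n 2) (!sig) (coeff * 2)
      (const + coeff * (if (!sig) && PySem.Int.mod n 2 = 0 then -1 else 0))
termination_by n.toNat
decreasing_by
  · simp only [PySem.Int.floordiv]; rw [Int.fdiv_eq_ediv]; omega

def helper_alt (n : Int) (sig : Bool) : Int := helperAltLoop n sig 1 0

-- ===== PRECONDITION & SPEC =====
-- Pre_ excludes n ≤ 0, where the Python A recurses forever (RecursionError) and B loops forever.
def Pre_helper (n : Int) (sig : Bool) : Prop := 1 ≤ n
instance (n : Int) (sig : Bool) : Decidable (Pre_helper n sig) := by unfold Pre_helper; infer_instance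
def pvWitness_helper : Int × Bool := (6, true)

def Spec_helper (n : Int) (sig : Bool) (out : Int) : Prop := out = helper_alt n sig
instance (n : Int) (sig : Bool) (out : Int) : Decidable (Spec_helper n sig out) := by unfold Spec_helper; infer_instance

-- ===== CLAIM (what is proved, stated in full; the proofs are below) =====
def Claim_equal_helper : Prop := ∀ (n : Int) (sig : Bool), Dom_helper n sig → Pre_helper n sig → Spec_helper n sig (helper n sig)

-- ===== LEMMAS AND PROOFS =====

-- Loop invariant: the accumulator is affine in helper's value.
theorem helperAltLoop_affine (n : Int) (sig : Bool) (coeff const : Int) :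
    helperAltLoop n sig coeff const = coeff * helper n sig + const := by
  by_cases h : n ≤ 1
  · unfold helperAltLoop helper
    simp [h]
  · have hd : (PySem.Int.floordiv n 2).toNat < n.toNat := by
      simp only [PySem.Int.floordiv]; rw [Int.fdiv_eq_ediv]; omega
    have ih := helperAltLoop_affine (PySem.Int.floordiv n 2)
    unfold helperAltLoop helper
    cases sig with
    | true => simp only [h, if_false, if_true, Bool.not_true, Bool.false_and, if_neg (by simp : ¬(false = true))]
              rw [ih]; ring
    | false =>
      by_cases he : PySem.Int.mod n 2 = 0
      · simp only [h, if_false, Bool.not_false, Bool.true_and, he, if_true,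
          (by simp : (false = true) = False), decide_true]
        rw [ih]; ring
      · simp only [h, if_false, Bool.not_false, Bool.true_and, he,
          (by simp : (false = true) = False), decide_false]
        rw [ih]; ring
termination_by n.toNat

-- ===== VERDICT (by name: the statement is the Claim_ definition above) =====
theorem helper_spec : Claim_equal_helper := by
  intro n sig _ _
  unfold Spec_helper helper_alt
  rw [helperAltLoop_affine]
  ring
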